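-- pv_equiv track=rewrite | github.com/brittbart/verisreports | pre_verify.py | is_top_outlet
-- ===== SOURCE A (Python) =====
-- TOP_OUTLETS = [
--     "bbc.com", "bbc.co.uk", "npr.org", "reuters.com", "apnews.com",
--     "nytimes.com", "washingtonpost.com", "theguardian.com", "foxnews.com",
--     "cnn.com", "aljazeera.com", "bloomberg.com", "wsj.com", "axios.com",
--     "thehill.com", "politico.com", "cbsnews.com", "nbcnews.com",
--     "abcnews.go.com", "msnbc.com"
-- ]
--
-- def is_top_outlet(source_name):
--     if not source_name:
--         return False
--     source_lower = source_name.lower()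
--     for outlet in TOP_OUTLETS:
--         if outlet in source_lower:
--             return True
--     return False
-- ===== SOURCE B (Python) =====
-- TOP_OUTLETS = [
--     "bbc.com", "bbc.co.uk", "npr.org", "reuters.com", "apnews.com",
--     "nytimes.com", "washingtonpost.com", "theguardian.com", "foxnews.com",
--     "cnn.com", "aljazeera.com", "bloomberg.com", "wsj.com", "axios.com",
--     "thehill.com", "politico.com", "cbsnews.com", "nbcnews.com",
--     "abcnews.go.com", "msnbc.com"
-- ]
--
--
-- def is_top_outlet(source_name):
--     if not source_name:
--         return False
--     s = source_name.lower()
--     # position-major scan: at each index, does some outlet start here?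
--     return any(
--         any(s.startswith(outlet, i) for outlet in TOP_OUTLETS)
--         for i in range(len(s))
--     )
-- ===== Notes on version B (the rewrite author's own statement) =====
-- stated objective: alternative
-- what changed: Replaces A's outlet-major loop of substring ('in') tests over the lowered name by a single position-major scan: for each index of the lowered string, check whether any outlet starts at that position with startswith.
import Mathlib
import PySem

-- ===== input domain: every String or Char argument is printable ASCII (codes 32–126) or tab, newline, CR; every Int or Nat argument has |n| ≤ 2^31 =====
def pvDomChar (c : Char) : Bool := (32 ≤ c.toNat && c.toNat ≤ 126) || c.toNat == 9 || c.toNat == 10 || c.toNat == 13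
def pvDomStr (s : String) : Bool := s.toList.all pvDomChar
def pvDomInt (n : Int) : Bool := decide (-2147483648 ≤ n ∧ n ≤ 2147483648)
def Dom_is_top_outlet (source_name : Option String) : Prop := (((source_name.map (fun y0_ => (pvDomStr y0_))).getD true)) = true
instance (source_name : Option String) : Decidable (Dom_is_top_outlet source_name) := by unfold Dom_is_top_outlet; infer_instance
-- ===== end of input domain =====

-- B replaces A's outlet-major substring loop by a position-major scan (startswith at each index); alternative structure, same cost.

-- ===== PORT A =====
def TOP_OUTLETS : List String := [
  "bbc.com", "bbc.co.uk", "npr.org", "reuters.com", "apnews.com",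
  "nytimes.com", "washingtonpost.com", "theguardian.com", "foxnews.com",
  "cnn.com", "aljazeera.com", "bloomberg.com", "wsj.com", "axios.com",
  "thehill.com", "politico.com", "cbsnews.com", "nbcnews.com",
  "abcnews.go.com", "msnbc.com"]

-- the 'for outlet in TOP_OUTLETS: if outlet in source_lower: return True' loop, early return and all
def topLoop : List String → String → Bool
  | [], _ => false
  | o :: rest, sl => if PySem.Str.isIn o sl then true else topLoop rest sl

def is_top_outlet (source_name : Option String) : Bool :=
  match source_name with
  | none => false                                   -- 'not source_name' on None
  | some s =>
    if PySem.Str.len s == 0 then false              -- 'not source_name' on a string = empty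
    else
      let source_lower := PySem.Str.lower s
      topLoop TOP_OUTLETS source_lower

-- ===== PORT B =====
def is_top_outlet_alt (source_name : Option String) : Bool :=
  match source_name with
  | none => false
  | some s =>
    if PySem.Str.len s == 0 then false
    else
      let cs := PySem.Chars.lower s.toList
      -- s.startswith(outlet, i) for 0 ≤ i is exactly: outlet prefix of s[i:]
      (List.range cs.length).any (fun i =>
        TOP_OUTLETS.any (fun o => o.toList.isPrefixOf (cs.drop i)))

-- ===== PRECONDITION & SPEC =====
def Spec_is_top_outlet (source_name : Option String) (out : Bool) : Prop := out = is_top_outlet_alt source_name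
instance (source_name : Option String) (out : Bool) : Decidable (Spec_is_top_outlet source_name out) := by unfold Spec_is_top_outlet; infer_instance

-- ===== CLAIM (what is proved, stated in full; the proofs are below) =====
def Claim_equal_is_top_outlet : Prop := ∀ (source_name : Option String), Dom_is_top_outlet source_name → Spec_is_top_outlet source_name (is_top_outlet source_name)

-- ===== LEMMAS AND PROOFS =====

-- A's early-return loop over TOP_OUTLETS is List.any of the substring test
theorem topLoop_eq_any (outs : List String) (sl : String) :
    topLoop outs sl = outs.any (fun o => PySem.Str.isIn o sl) := by
  induction outs with
  | nil => rfl
  | cons o rest ih =>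
    simp only [topLoop, List.any_cons, ih]
    cases h : PySem.Str.isIn o sl <;> simp

theorem outlets_nonempty : ∀ o ∈ TOP_OUTLETS, o.toList ≠ [] := by decide

-- ===== VERDICT (by name: the statement is the Claim_ definition above) =====
theorem is_top_outlet_spec : Claim_equal_is_top_outlet := by
  intro source_name _
  unfold Spec_is_top_outlet
  cases source_name with
  | none => rfl
  | some s =>
    simp only [is_top_outlet, is_top_outlet_alt]
    cases hb0 : (PySem.Str.len s == 0)
    · rw [if_neg (by simp), if_neg (by simp)]
      have hbr : ∀ o : String, PySem.Str.isIn o (PySem.Str.lower s) =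
          PySem.Chars.isIn o.toList (PySem.Chars.lower s.toList) := by
        intro o; simp [pysem]
      rw [topLoop_eq_any, Bool.eq_iff_iff, List.any_eq_true, List.any_eq_true]
      constructor
      · rintro ⟨o, ho, hin⟩
        rw [hbr] at hin
        obtain ⟨j, hp⟩ := (PySem.Chars.exists_prefix_drop_iff_isIn _ _).mpr hin
        by_cases hj : j < (PySem.Chars.lower s.toList).length
        · exact ⟨j, List.mem_range.mpr hj,
            List.any_eq_true.mpr ⟨o, ho, (List.isPrefixOf_iff_prefix).mpr hp⟩⟩
        · exfalso
          rw [List.drop_eq_nil_of_le (by omega), List.prefix_nil] at hp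
          exact outlets_nonempty o ho hp
      · rintro ⟨i, hi, h2⟩
        obtain ⟨o, ho, hp⟩ := List.any_eq_true.mp h2
        refine ⟨o, ho, ?_⟩
        rw [hbr]
        exact (PySem.Chars.exists_prefix_drop_iff_isIn _ _).mp
          ⟨i, (List.isPrefixOf_iff_prefix).mp hp⟩
    · rw [if_pos (by simp), if_pos (by simp)]
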